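-- pv_equiv track=rewrite | github.com/spegeerino/projects | Project Euler/projeuler250.py | poly_times
-- ===== SOURCE A (Python) =====
-- mod = 10 ** 16
--
-- def poly_times(p, q):
--     out_len = min(250, len(p) + len(q) - 1)
--     out = [0] * out_len
--     for i in range(len(p)):
--         for j in range(len(q)):
--             index = (i + j) % 250
--             out[index] += (p[i] * q[j]) % mod
--             out[index] %= mod
--     return out
-- ===== SOURCE B (Python) =====
-- mod = 10 ** 16
--
-- def poly_times(p, q):
--     out_len = min(250, len(p) + len(q) - 1)
--     np_ = min(250, len(p))
--     nq_ = min(250, len(q))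
--     P = [0] * np_
--     for i in range(len(p)):
--         P[i % 250] += p[i]
--     Q = [0] * nq_
--     for j in range(len(q)):
--         Q[j % 250] += q[j]
--     out = [0] * out_len
--     for r in range(np_):
--         for s in range(nq_):
--             k = (r + s) % 250
--             out[k] = (out[k] + P[r] * Q[s]) % mod
--     return out
-- ===== Notes on version B (the rewrite author's own statement) =====
-- stated objective: faster
-- what changed: Instead of A's full double loop over all coefficient pairs, B first collapses each polynomial into at most 250 residue-class bucket sums and then does one cyclic 250x250 convolution of the buckets.
import Mathlib
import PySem

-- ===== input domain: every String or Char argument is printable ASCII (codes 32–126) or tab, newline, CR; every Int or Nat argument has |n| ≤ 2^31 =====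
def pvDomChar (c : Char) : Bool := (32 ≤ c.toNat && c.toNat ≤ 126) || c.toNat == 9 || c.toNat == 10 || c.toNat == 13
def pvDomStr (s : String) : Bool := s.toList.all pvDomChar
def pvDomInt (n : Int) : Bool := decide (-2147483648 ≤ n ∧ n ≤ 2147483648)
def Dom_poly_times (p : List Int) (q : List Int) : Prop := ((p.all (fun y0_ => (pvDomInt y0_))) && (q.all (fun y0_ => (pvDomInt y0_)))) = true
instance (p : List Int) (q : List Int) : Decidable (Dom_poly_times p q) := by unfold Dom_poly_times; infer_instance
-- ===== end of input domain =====

-- B replaces A's double loop over all coefficient pairs by 250 residue-class bucket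
-- sums per polynomial followed by a 250x250 cyclic convolution of the buckets.

-- ===== PORT A =====
-- mod = 10 ** 16
def pvM : Int := 10 ^ 16

-- Literal port of A.  Loop indices come from List.range, so every p[i]/q[j]/out[index]
-- access is in range (index = (i+j)%250 < out_len, proved below); getD/set are exact there.
-- '%' on ints is PySem.Int.mod (Python's floor mod).
def poly_times (p : List Int) (q : List Int) : List Int :=
  let out_len : Int := min 250 ((p.length : Int) + (q.length : Int) - 1)
  let out : List Int := List.replicate out_len.toNat 0
  (List.range p.length).foldl (fun out i =>
    (List.range q.length).foldl (fun out j =>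
      let index : Nat := (i + j) % 250
      let out := out.set index (out.getD index 0 + PySem.Int.mod (p.getD i 0 * q.getD j 0) pvM)
      out.set index (PySem.Int.mod (out.getD index 0) pvM)) out) out

-- ===== PORT B =====
-- Literal port of Source B (same in-range remarks as for A).
def poly_times_alt (p : List Int) (q : List Int) : List Int :=
  let out_len : Int := min 250 ((p.length : Int) + (q.length : Int) - 1)
  let np_ : Nat := min 250 p.length
  let nq_ : Nat := min 250 q.length
  let P : List Int := (List.range p.length).foldl
    (fun P i => P.set (i % 250) (P.getD (i % 250) 0 + p.getD i 0)) (List.replicate np_ 0)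
  let Q : List Int := (List.range q.length).foldl
    (fun Q j => Q.set (j % 250) (Q.getD (j % 250) 0 + q.getD j 0)) (List.replicate nq_ 0)
  let out : List Int := List.replicate out_len.toNat 0
  (List.range np_).foldl (fun out r =>
    (List.range nq_).foldl (fun out s =>
      let k : Nat := (r + s) % 250
      out.set k (PySem.Int.mod (out.getD k 0 + P.getD r 0 * Q.getD s 0) pvM)) out) out

-- ===== PRECONDITION & SPEC =====
def Spec_poly_times (p : List Int) (q : List Int) (out : List Int) : Prop := out = poly_times_alt p q
instance (p : List Int) (q : List Int) (out : List Int) : Decidable (Spec_poly_times p q out) := by unfold Spec_poly_times; infer_instance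

-- ===== CLAIM (what is proved, stated in full; the proofs are below) =====
def Claim_equal_poly_times : Prop := ∀ (p : List Int) (q : List Int), Dom_poly_times p q → Spec_poly_times p q (poly_times p q)

-- ===== LEMMAS AND PROOFS =====
def keySum {ι : Type} (key : ι → Nat) (val : ι → Int) (L : List ι) (t : Nat) : Int :=
  ((L.filter (fun a => key a == t)).map val).sum

lemma keySum_nil {ι : Type} (key : ι → Nat) (val : ι → Int) (t : Nat) :
    keySum key val [] t = 0 := rfl

lemma keySum_cons {ι : Type} (key : ι → Nat) (val : ι → Int) (a : ι) (L : List ι) (t : Nat) :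
    keySum key val (a :: L) t = (if key a = t then val a else 0) + keySum key val L t := by
  simp [keySum, List.filter_cons]
  split_ifs <;> simp

lemma pvM_lit : pvM = 10000000000000000 := by norm_num [pvM]

lemma fold_mod_inv {ι : Type} (key : ι → Nat) (val : ι → Int)
    (body : List Int → ι → List Int)
    (hbody : ∀ o a, key a < o.length →
      body o a = o.set (key a) ((o.getD (key a) 0 + val a) % pvM))
    (L : List ι) (o : List Int) (A : Nat → Int)
    (hk : ∀ a ∈ L, key a < o.length)
    (hA : ∀ t, t < o.length → o.getD t 0 = A t % pvM) :
    (L.foldl body o).length = o.length ∧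
    ∀ t, t < o.length → (L.foldl body o).getD t 0 = (A t + keySum key val L t) % pvM := by
  induction L generalizing o A with
  | nil =>
    refine ⟨rfl, fun t ht => ?_⟩
    rw [List.foldl_nil, hA t ht, keySum_nil, pvM_lit]; omega
  | cons a L ih =>
    have hka : key a < o.length := hk a (List.mem_cons_self)
    have hb : body o a = o.set (key a) ((o.getD (key a) 0 + val a) % pvM) := hbody o a hka
    have hlen : (body o a).length = o.length := by rw [hb]; simp
    have ih' := ih (body o a) (fun t => if t = key a then A t + val a else A t)
      (by intro b hbL; rw [hlen]; exact hk b (List.mem_cons_of_mem _ hbL))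
      (by
        intro t ht
        rw [hlen] at ht
        rw [hb, List.getD_eq_getElem _ _ (by simpa using ht), List.getElem_set]
        beta_reduce
        by_cases h : key a = t
        · rw [if_pos h, if_pos h.symm, ← h, hA _ hka, pvM_lit]
          omega
        · rw [if_neg h, if_neg (fun hh => h hh.symm),
            ← List.getD_eq_getElem _ _ (by simpa using ht), hA t ht])
    rw [List.foldl_cons]
    refine ⟨by rw [ih'.1, hlen], fun t ht => ?_⟩
    rw [ih'.2 t (by rwa [hlen]), keySum_cons]
    beta_reduce
    by_cases h : key a = t
    · rw [if_pos h, if_pos h.symm]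
      congr 1
      ring
    · rw [if_neg h, if_neg (fun hh => h hh.symm)]
      congr 1
      ring

lemma fold_add_inv {ι : Type} (key : ι → Nat) (val : ι → Int)
    (L : List ι) (o : List Int)
    (hk : ∀ a ∈ L, key a < o.length) :
    ((L.foldl (fun o a => o.set (key a) (o.getD (key a) 0 + val a)) o).length = o.length) ∧
    ∀ t, t < o.length →
      (L.foldl (fun o a => o.set (key a) (o.getD (key a) 0 + val a)) o).getD t 0
        = o.getD t 0 + keySum key val L t := by
  induction L generalizing o with
  | nil => exact ⟨rfl, fun t ht => by rw [List.foldl_nil, keySum_nil, add_zero]⟩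
  | cons a L ih =>
    have hka : key a < o.length := hk a (List.mem_cons_self)
    have hlen : (o.set (key a) (o.getD (key a) 0 + val a)).length = o.length := by simp
    have ih' := ih (o.set (key a) (o.getD (key a) 0 + val a))
      (by intro b hbL; rw [hlen]; exact hk b (List.mem_cons_of_mem _ hbL))
    rw [List.foldl_cons]
    refine ⟨by rw [ih'.1, hlen], fun t ht => ?_⟩
    rw [ih'.2 t (by rwa [hlen]), keySum_cons]
    rw [List.getD_eq_getElem _ _ (by simpa using ht), List.getElem_set]
    by_cases h : key a = t
    · rw [if_pos h, if_pos h, ← h]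
      ring
    · rw [if_neg h, if_neg h, ← List.getD_eq_getElem _ _ (by simpa using ht)]
      ring

lemma nested_foldl {α β γ : Type} (l₁ : List α) (f : α → List β)
    (g : γ → α → β → γ) (o : γ) :
    l₁.foldl (fun o a => (f a).foldl (fun o b => g o a b) o) o
      = (l₁.flatMap (fun a => (f a).map (fun b => (a, b)))).foldl
          (fun o ab => g o ab.1 ab.2) o := by
  induction l₁ generalizing o with
  | nil => rfl
  | cons a l ih =>
    rw [List.foldl_cons, List.flatMap_cons, List.foldl_append, List.foldl_map, ih]

lemma keySum_append {ι : Type} (key : ι → Nat) (val : ι → Int) (L₁ L₂ : List ι) (t : Nat) :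
    keySum key val (L₁ ++ L₂) t = keySum key val L₁ t + keySum key val L₂ t := by
  simp [keySum, List.filter_append]

lemma keySum_range (n : Nat) (key : Nat → Nat) (val : Nat → Int) (t : Nat) :
    keySum key val (List.range n) t
      = ∑ i ∈ Finset.range n, if key i = t then val i else 0 := by
  induction n with
  | zero => rfl
  | succ n ih =>
    rw [List.range_succ, keySum_append, Finset.sum_range_succ, ih]
    congr 1
    rw [keySum_cons, keySum_nil, add_zero]

lemma keySum_map {ι κ : Type} (key : κ → Nat) (val : κ → Int) (f : ι → κ) (L : List ι) (t : Nat) :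
    keySum key val (L.map f) t = keySum (fun a => key (f a)) (fun a => val (f a)) L t := by
  induction L with
  | nil => rfl
  | cons a L ih => rw [List.map_cons, keySum_cons, keySum_cons, ih]

def pairsOf (n m : Nat) : List (Nat × Nat) :=
  (List.range n).flatMap (fun i => (List.range m).map (fun j => (i, j)))

lemma keySum_pairs (n m : Nat) (key : Nat × Nat → Nat) (val : Nat × Nat → Int) (t : Nat) :
    keySum key val (pairsOf n m) t
      = ∑ i ∈ Finset.range n, ∑ j ∈ Finset.range m,
          if key (i, j) = t then val (i, j) else 0 := by
  induction n with
  | zero => rfl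
  | succ n ih =>
    rw [pairsOf, List.range_succ, List.flatMap_append, keySum_append,
      Finset.sum_range_succ, ← pairsOf, ih]
    congr 1
    rw [List.flatMap_cons, List.flatMap_nil, List.append_nil, keySum_map, keySum_range]

lemma collapse_one (N : Nat) (c : Nat) (F : Nat → Int) (hc : c ∈ Finset.range N) :
    (∑ r ∈ Finset.range N, if c = r then F r else 0) = F c := by
  rw [Finset.sum_ite_eq, if_pos hc]

lemma sum_swap4 (I J R S : Finset Nat) (T : Nat → Nat → Nat → Nat → Int) :
    (∑ i ∈ I, ∑ j ∈ J, ∑ r ∈ R, ∑ s ∈ S, T i j r s)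
      = ∑ r ∈ R, ∑ s ∈ S, ∑ i ∈ I, ∑ j ∈ J, T i j r s :=
  calc (∑ i ∈ I, ∑ j ∈ J, ∑ r ∈ R, ∑ s ∈ S, T i j r s)
      = ∑ i ∈ I, ∑ r ∈ R, ∑ j ∈ J, ∑ s ∈ S, T i j r s :=
        Finset.sum_congr rfl fun i _ => Finset.sum_comm
    _ = ∑ r ∈ R, ∑ i ∈ I, ∑ j ∈ J, ∑ s ∈ S, T i j r s := Finset.sum_comm
    _ = ∑ r ∈ R, ∑ i ∈ I, ∑ s ∈ S, ∑ j ∈ J, T i j r s :=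
        Finset.sum_congr rfl fun r _ => Finset.sum_congr rfl fun i _ => Finset.sum_comm
    _ = ∑ r ∈ R, ∑ s ∈ S, ∑ i ∈ I, ∑ j ∈ J, T i j r s :=
        Finset.sum_congr rfl fun r _ => Finset.sum_comm

lemma bucket_identity (n m : Nat) (f g : Nat → Int) (t : Nat) :
    (∑ i ∈ Finset.range n, ∑ j ∈ Finset.range m,
        if (i + j) % 250 = t then f i * g j else 0)
      = ∑ r ∈ Finset.range (min 250 n), ∑ s ∈ Finset.range (min 250 m),
          if (r + s) % 250 = t then
            (∑ i ∈ Finset.range n, if i % 250 = r then f i else 0) *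
            (∑ j ∈ Finset.range m, if j % 250 = s then g j else 0)
          else 0 := by
  have exp : ∀ r s : Nat,
      (if (r + s) % 250 = t then
        (∑ i ∈ Finset.range n, if i % 250 = r then f i else 0) *
        (∑ j ∈ Finset.range m, if j % 250 = s then g j else 0) else 0)
      = ∑ i ∈ Finset.range n, ∑ j ∈ Finset.range m,
          (if i % 250 = r then f i else 0) * (if j % 250 = s then g j else 0) *
            (if (r + s) % 250 = t then 1 else 0) := by
    intro r s
    rw [Finset.sum_mul_sum]
    split_ifs with h
    · simp
    · simp
  have coll : ∀ i ∈ Finset.range n, ∀ j ∈ Finset.range m,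
      (∑ r ∈ Finset.range (min 250 n), ∑ s ∈ Finset.range (min 250 m),
          (if i % 250 = r then f i else 0) * (if j % 250 = s then g j else 0) *
            (if (r + s) % 250 = t then 1 else 0))
      = if (i + j) % 250 = t then f i * g j else 0 := by
    intro i hi j hj
    rw [Finset.mem_range] at hi hj
    have hmi : i % 250 ∈ Finset.range (min 250 n) := Finset.mem_range.mpr (by omega)
    have hmj : j % 250 ∈ Finset.range (min 250 m) := Finset.mem_range.mpr (by omega)
    have step : ∀ r : Nat,
        (∑ s ∈ Finset.range (min 250 m),
          (if i % 250 = r then f i else 0) * (if j % 250 = s then g j else 0) *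
            (if (r + s) % 250 = t then 1 else 0))
        = if i % 250 = r then
            f i * (g j * (if (r + j % 250) % 250 = t then 1 else 0)) else 0 := by
      intro r
      by_cases h : i % 250 = r
      · rw [if_pos h, if_pos h]
        refine (Finset.sum_congr rfl fun s _ => ?_).trans
          (collapse_one (min 250 m) (j % 250)
            (fun s => f i * (g j * (if (r + s) % 250 = t then 1 else 0))) hmj)
        by_cases h2 : j % 250 = s <;> simp [h, h2, mul_assoc]
      · have hz : ∀ s ∈ Finset.range (min 250 m),
            ((if i % 250 = r then f i else 0) * (if j % 250 = s then g j else 0) *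
              (if (r + s) % 250 = t then 1 else 0)) = 0 :=
          fun s _ => by rw [if_neg h, zero_mul, zero_mul]
        rw [Finset.sum_eq_zero hz, if_neg h]
    rw [Finset.sum_congr rfl (fun r _ => step r),
      collapse_one (min 250 n) (i % 250)
        (fun r => f i * (g j * (if (r + j % 250) % 250 = t then 1 else 0))) hmi,
      ← Nat.add_mod]
    split_ifs with h <;> simp [h]
  calc (∑ i ∈ Finset.range n, ∑ j ∈ Finset.range m,
          if (i + j) % 250 = t then f i * g j else 0)
      = ∑ i ∈ Finset.range n, ∑ j ∈ Finset.range m,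
          ∑ r ∈ Finset.range (min 250 n), ∑ s ∈ Finset.range (min 250 m),
            (if i % 250 = r then f i else 0) * (if j % 250 = s then g j else 0) *
              (if (r + s) % 250 = t then 1 else 0) := by
        refine Finset.sum_congr rfl fun i hi => Finset.sum_congr rfl fun j hj => ?_
        rw [coll i hi j hj]
    _ = ∑ r ∈ Finset.range (min 250 n), ∑ s ∈ Finset.range (min 250 m),
          ∑ i ∈ Finset.range n, ∑ j ∈ Finset.range m,
            (if i % 250 = r then f i else 0) * (if j % 250 = s then g j else 0) *
              (if (r + s) % 250 = t then 1 else 0) :=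
        sum_swap4 _ _ _ _ _
    _ = _ := Finset.sum_congr rfl fun r _ => Finset.sum_congr rfl fun s _ => (exp r s).symm

def bodyA (p q : List Int) (out : List Int) (i j : Nat) : List Int :=
  let index : Nat := (i + j) % 250
  let out := out.set index (out.getD index 0 + PySem.Int.mod (p.getD i 0 * q.getD j 0) pvM)
  out.set index (PySem.Int.mod (out.getD index 0) pvM)


lemma pvM_pos : (0:Int) < pvM := by rw [pvM_lit]; norm_num

lemma poly_times_eq_body (p q : List Int) :
    poly_times p q
      = (List.range p.length).foldl (fun out i =>
          (List.range q.length).foldl (fun out j => bodyA p q out i j) out)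
          (List.replicate (min 250 ((p.length : Int) + (q.length : Int) - 1)).toNat 0) := rfl

lemma bodyA_set (p q : List Int) (o : List Int) (a : Nat × Nat)
    (h : (a.1 + a.2) % 250 < o.length) :
    bodyA p q o a.1 a.2
      = o.set ((a.1 + a.2) % 250)
          ((o.getD ((a.1 + a.2) % 250) 0 + p.getD a.1 0 * q.getD a.2 0) % pvM) := by
  have hset : ∀ (l : List Int) (k : Nat) (v : Int), k < l.length → (l.set k v).getD k 0 = v :=
    fun l k v hk => by rw [List.getD_eq_getElem _ _ (by simpa using hk), List.getElem_set_self]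
  simp only [bodyA]
  rw [PySem.Int.mod_eq_emod_of_pos pvM_pos, PySem.Int.mod_eq_emod_of_pos pvM_pos,
    hset o ((a.1 + a.2) % 250) _ h, List.set_set]
  congr 1
  rw [pvM_lit]
  omega

def SA (p q : List Int) (t : Nat) : Int :=
  ∑ i ∈ Finset.range p.length, ∑ j ∈ Finset.range q.length,
    if (i + j) % 250 = t then p.getD i 0 * q.getD j 0 else 0

lemma A_char (p q : List Int) :
    (poly_times p q).length = (min 250 ((p.length : Int) + (q.length : Int) - 1)).toNat ∧
    ∀ t, t < (min 250 ((p.length : Int) + (q.length : Int) - 1)).toNat →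
      (poly_times p q).getD t 0 = SA p q t % pvM := by
  rw [poly_times_eq_body,
    nested_foldl (List.range p.length) (fun _ => List.range q.length) (bodyA p q)]
  have hk : ∀ a ∈ pairsOf p.length q.length,
      (fun ij : Nat × Nat => (ij.1 + ij.2) % 250) a
        < (List.replicate (min 250 ((p.length : Int) + (q.length : Int) - 1)).toNat (0:Int)).length := by
    intro a ha
    simp only [pairsOf, List.mem_flatMap, List.mem_map, List.mem_range] at ha
    obtain ⟨i, hi, j, hj, rfl⟩ := ha
    simp only [List.length_replicate]
    omega
  have h := fold_mod_inv (fun ij : Nat × Nat => (ij.1 + ij.2) % 250)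
    (fun ij : Nat × Nat => p.getD ij.1 0 * q.getD ij.2 0)
    (fun o ab => bodyA p q o ab.1 ab.2)
    (fun o a ha => bodyA_set p q o a ha)
    (pairsOf p.length q.length)
    (List.replicate (min 250 ((p.length : Int) + (q.length : Int) - 1)).toNat 0)
    (fun _ => 0) hk
    (by intro t ht; simp)
  rw [List.length_replicate] at h
  refine ⟨h.1, fun t ht => ?_⟩
  rw [show ((List.range p.length).flatMap fun a => (List.range q.length).map fun b => (a, b))
      = pairsOf p.length q.length from rfl,
    h.2 t ht, zero_add, keySum_pairs, SA]

def bucketFold (x : List Int) : List Int :=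
  (List.range x.length).foldl
    (fun P i => P.set (i % 250) (P.getD (i % 250) 0 + x.getD i 0))
    (List.replicate (min 250 x.length) 0)

lemma bucket_char (x : List Int) :
    (bucketFold x).length = min 250 x.length ∧
    ∀ r, r < min 250 x.length →
      (bucketFold x).getD r 0
        = ∑ i ∈ Finset.range x.length, if i % 250 = r then x.getD i 0 else 0 := by
  have h := fold_add_inv (fun i : Nat => i % 250) (fun i => x.getD i 0)
    (List.range x.length) (List.replicate (min 250 x.length) 0)
    (by intro a ha
        simp only [List.mem_range] at ha
        simp only [List.length_replicate]
        omega)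
  constructor
  · simpa using h.1
  · intro r hr
    have h2 := h.2 r (by simp only [List.length_replicate]; exact hr)
    rw [show (bucketFold x).getD r 0
        = (List.replicate (min 250 x.length) (0:Int)).getD r 0
            + keySum (fun i : Nat => i % 250) (fun i => x.getD i 0) (List.range x.length) r
      from h2, keySum_range]
    simp


def bodyB (p q : List Int) (out : List Int) (r s : Nat) : List Int :=
  let k : Nat := (r + s) % 250
  out.set k (PySem.Int.mod (out.getD k 0 + (bucketFold p).getD r 0 * (bucketFold q).getD s 0) pvM)

lemma poly_times_alt_eq_body (p q : List Int) :
    poly_times_alt p q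
      = (List.range (min 250 p.length)).foldl (fun out r =>
          (List.range (min 250 q.length)).foldl (fun out s => bodyB p q out r s) out)
          (List.replicate (min 250 ((p.length : Int) + (q.length : Int) - 1)).toNat 0) := rfl

lemma bodyB_set (p q : List Int) (o : List Int) (a : Nat × Nat) :
    bodyB p q o a.1 a.2
      = o.set ((a.1 + a.2) % 250)
          ((o.getD ((a.1 + a.2) % 250) 0 + (bucketFold p).getD a.1 0 * (bucketFold q).getD a.2 0) % pvM) := by
  simp only [bodyB]
  rw [PySem.Int.mod_eq_emod_of_pos pvM_pos]

def SB (p q : List Int) (t : Nat) : Int :=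
  ∑ r ∈ Finset.range (min 250 p.length), ∑ s ∈ Finset.range (min 250 q.length),
    if (r + s) % 250 = t then
      (∑ i ∈ Finset.range p.length, if i % 250 = r then p.getD i 0 else 0) *
      (∑ j ∈ Finset.range q.length, if j % 250 = s then q.getD j 0 else 0)
    else 0

lemma B_char (p q : List Int) :
    (poly_times_alt p q).length = (min 250 ((p.length : Int) + (q.length : Int) - 1)).toNat ∧
    ∀ t, t < (min 250 ((p.length : Int) + (q.length : Int) - 1)).toNat →
      (poly_times_alt p q).getD t 0 = SB p q t % pvM := by
  rw [poly_times_alt_eq_body,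
    nested_foldl (List.range (min 250 p.length)) (fun _ => List.range (min 250 q.length)) (bodyB p q)]
  have hk : ∀ a ∈ pairsOf (min 250 p.length) (min 250 q.length),
      (fun ij : Nat × Nat => (ij.1 + ij.2) % 250) a
        < (List.replicate (min 250 ((p.length : Int) + (q.length : Int) - 1)).toNat (0:Int)).length := by
    intro a ha
    simp only [pairsOf, List.mem_flatMap, List.mem_map, List.mem_range] at ha
    obtain ⟨r, hr, s, hs, rfl⟩ := ha
    simp only [List.length_replicate]
    omega
  have h := fold_mod_inv (fun ij : Nat × Nat => (ij.1 + ij.2) % 250)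
    (fun ij : Nat × Nat => (bucketFold p).getD ij.1 0 * (bucketFold q).getD ij.2 0)
    (fun o ab => bodyB p q o ab.1 ab.2)
    (fun o a _ => bodyB_set p q o a)
    (pairsOf (min 250 p.length) (min 250 q.length))
    (List.replicate (min 250 ((p.length : Int) + (q.length : Int) - 1)).toNat 0)
    (fun _ => 0) hk
    (by intro t ht; simp)
  rw [List.length_replicate] at h
  refine ⟨h.1, fun t ht => ?_⟩
  rw [show ((List.range (min 250 p.length)).flatMap fun a => (List.range (min 250 q.length)).map fun b => (a, b))
      = pairsOf (min 250 p.length) (min 250 q.length) from rfl,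
    h.2 t ht, zero_add, keySum_pairs, SB]
  congr 1
  refine Finset.sum_congr rfl fun r hr => Finset.sum_congr rfl fun s hs => ?_
  rw [Finset.mem_range] at hr hs
  simp only []
  rw [(bucket_char p).2 r hr, (bucket_char q).2 s hs]

lemma poly_main (p q : List Int) : poly_times p q = poly_times_alt p q := by
  have hA := A_char p q
  have hB := B_char p q
  apply List.ext_getElem (by rw [hA.1, hB.1])
  intro i h1 h2
  rw [← List.getD_eq_getElem _ _ h1, ← List.getD_eq_getElem _ _ h2,
    hA.2 i (by rwa [hA.1] at h1), hB.2 i (by rwa [hB.1] at h2)]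
  rw [SA, SB, bucket_identity]

-- ===== VERDICT (by name: the statement is the Claim_ definition above) =====
theorem poly_times_spec : Claim_equal_poly_times := by
  intro p q _
  unfold Spec_poly_times
  exact poly_main p q
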